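-- pv_equiv track=rewrite | github.com/jinh0ng/Programming-WB-UT- | RecursiveFunctions.py | findLastUppercase
-- ===== SOURCE A (Python) =====
-- def findLastUppercase(s):
--     """ Return the last uppercase letter in
--     string s, if any. Return None if there
--     is none. """
--     if not s:
--         return None
--     else:
--         last_upper = findLastUppercase(s[1:])
--         if last_upper:
--             return last_upper
--         elif s[0].isupper():
--             return s[0]
--         else:
--             return None
-- ===== SOURCE B (Python) =====
-- def findLastUppercase(s):
--     """ Return the last uppercase letter in
--     string s, if any. Return None if there
--     is none. """
--     ups = [c for c in s if c.isupper()]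
--     return ups[-1] if ups else None
-- ===== Notes on version B (the rewrite author's own statement) =====
-- stated objective: idiomatic
-- what changed: Replaced the right-to-left recursion (which recurses on s[1:] before looking at s[0]) with a two-phase collect-then-index pass: a comprehension gathers all uppercase letters left-to-right, and the last one (or None) is returned.
import Mathlib
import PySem

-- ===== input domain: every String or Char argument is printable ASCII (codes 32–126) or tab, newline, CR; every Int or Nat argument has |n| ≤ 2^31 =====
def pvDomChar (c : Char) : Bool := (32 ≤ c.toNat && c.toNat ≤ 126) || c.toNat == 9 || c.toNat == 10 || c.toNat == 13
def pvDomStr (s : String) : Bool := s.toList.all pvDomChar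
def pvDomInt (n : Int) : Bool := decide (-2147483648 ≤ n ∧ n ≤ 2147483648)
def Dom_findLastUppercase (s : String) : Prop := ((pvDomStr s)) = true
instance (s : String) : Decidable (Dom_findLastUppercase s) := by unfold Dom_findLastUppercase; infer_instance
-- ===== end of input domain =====

-- B replaces A's right-to-left recursion with an idiomatic collect-then-index pass (filter the uppercase letters, return the last or none).


-- ===== PORT A =====
-- A recurses on s[1:] first, then inspects s[0]; ported as structural recursion on the character list.
def findLastUppercaseAux : List Char → Option String
  | [] => none
  | c :: rest =>
    match findLastUppercaseAux rest with
    | some u => some u                     -- `if last_upper:` — a found letter is a nonempty (truthy) string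
    | none => if PySem.Chars.isupper c then some (String.ofList [c]) else none

def findLastUppercase (s : String) : Option String := findLastUppercaseAux s.toList

-- ===== PORT B =====
def findLastUppercase_alt (s : String) : Option String :=
  let ups := s.toList.filter (fun c => PySem.Chars.isupper c)
  match ups.getLast? with
  | some c => some (String.ofList [c])         -- ups[-1]
  | none => none                           -- ups is empty

-- ===== PRECONDITION & SPEC =====
def Spec_findLastUppercase (s : String) (out : Option String) : Prop := out = findLastUppercase_alt s
instance (s : String) (out : Option String) : Decidable (Spec_findLastUppercase s out) := by unfold Spec_findLastUppercase; infer_instance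

-- ===== CLAIM (what is proved, stated in full; the proofs are below) =====
def Claim_equal_findLastUppercase : Prop := ∀ (s : String), Dom_findLastUppercase s → Spec_findLastUppercase s (findLastUppercase s)

-- ===== LEMMAS AND PROOFS =====
theorem findLastUppercaseAux_eq (l : List Char) :
    findLastUppercaseAux l =
      match l.reverse.find? (fun c => PySem.Chars.isupper c) with
      | some c => some (String.ofList [c])
      | none => none := by
  induction l with
  | nil => rfl
  | cons c rest ih =>
    rw [findLastUppercaseAux, ih, List.reverse_cons, List.find?_append]
    rcases hr : rest.reverse.find? (fun c => PySem.Chars.isupper c) with _ | u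
    · by_cases h : PySem.Chars.isupper c = true <;> simp [List.find?, h]
    · simp

theorem getLast?_filter_eq (l : List Char) (p : Char → Bool) :
    (l.filter p).getLast? = l.reverse.find? p := by
  rw [List.getLast?_eq_head?_reverse, ← List.filter_reverse, List.head?_filter]

-- ===== VERDICT (by name: the statement is the Claim_ definition above) =====
theorem findLastUppercase_spec : Claim_equal_findLastUppercase := by
  intro s _
  unfold Spec_findLastUppercase findLastUppercase findLastUppercase_alt
  rw [findLastUppercaseAux_eq]
  show _ = match (List.filter (fun c => PySem.Chars.isupper c) s.toList).getLast? with
    | some c => some (String.ofList [c])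
    | none => none
  rw [getLast?_filter_eq]
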